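-- pv_equiv track=rewrite | github.com/hanjuhn/agent-cast | test_topic_report.py | determine_primary_topic
-- ===== SOURCE A (Python) =====
-- def determine_primary_topic(category, keywords):
--     """주제의 주요 카테고리를 결정합니다."""
--     if not keywords:
--         return category
--
--     # AI 관련 키워드가 많으면 AI/ML로 분류
--     ai_count = sum(1 for k in keywords if k in ['AI', 'LLM', 'GPT', 'Claude', '에이전트', '머신러닝'])
--     if ai_count >= 2:
--         return "AI/머신러닝"
--
--     # 하드웨어/시스템 관련 키워드가 많으면 시스템/인프라로 분류
--     system_count = sum(1 for k in keywords if k in ['GPU', 'NPU', '하드웨어', '모니터링', '프로토콜'])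
--     if system_count >= 2:
--         return "시스템/인프라"
--
--     # 개발 도구 관련 키워드가 많으면 개발도구로 분류
--     dev_count = sum(1 for k in keywords if k in ['AI코딩', 'AI도구', '웹개발', 'API'])
--     if dev_count >= 2:
--         return "개발도구"
--
--     return category
-- ===== SOURCE B (Python) =====
-- _LOOKUP = {
--     'AI': 'AI/머신러닝', 'LLM': 'AI/머신러닝', 'GPT': 'AI/머신러닝',
--     'Claude': 'AI/머신러닝', '에이전트': 'AI/머신러닝', '머신러닝': 'AI/머신러닝',
--     'GPU': '시스템/인프라', 'NPU': '시스템/인프라', '하드웨어': '시스템/인프라',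
--     '모니터링': '시스템/인프라', '프로토콜': '시스템/인프라',
--     'AI코딩': '개발도구', 'AI도구': '개발도구', '웹개발': '개발도구', 'API': '개발도구',
-- }
--
-- def determine_primary_topic(category, keywords):
--     """주제의 주요 카테고리를 결정합니다."""
--     if not keywords:
--         return category
--     counts = {}
--     for k in keywords:
--         label = _LOOKUP.get(k)
--         if label is not None:
--             counts[label] = counts.get(label, 0) + 1
--     for label in ('AI/머신러닝', '시스템/인프라', '개발도구'):
--         if counts.get(label, 0) >= 2:
--             return label
--     return category
-- ===== Notes on version B (the rewrite author's own statement) =====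
-- stated objective: faster
-- what changed: B replaces A's three separate membership-scan sums over keywords with a keyword-to-category lookup dict built once and a single counting pass, then checks the three thresholds in order.
import Mathlib
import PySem

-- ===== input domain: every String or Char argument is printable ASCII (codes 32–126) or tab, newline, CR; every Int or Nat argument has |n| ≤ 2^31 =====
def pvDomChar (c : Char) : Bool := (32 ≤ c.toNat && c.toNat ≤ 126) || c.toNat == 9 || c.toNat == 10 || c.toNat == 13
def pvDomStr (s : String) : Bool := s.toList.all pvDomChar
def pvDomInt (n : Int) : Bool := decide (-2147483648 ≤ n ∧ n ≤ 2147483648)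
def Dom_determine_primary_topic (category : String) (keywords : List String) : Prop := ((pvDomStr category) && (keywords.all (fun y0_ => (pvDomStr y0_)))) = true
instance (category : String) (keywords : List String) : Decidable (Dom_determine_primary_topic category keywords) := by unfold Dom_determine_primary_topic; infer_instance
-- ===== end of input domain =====

-- B builds a keyword→category lookup dict once and makes a single counting pass instead of A's three membership-scan sums (objective: simpler).

-- ===== PORT A =====
def determine_primary_topic (category : String) (keywords : List String) : String :=
  if keywords = [] then category
  else
    let ai_count : Int :=
      (keywords.map (fun k => if k ∈ ["AI", "LLM", "GPT", "Claude", "에이전트", "머신러닝"] then (1 : Int) else 0)).sum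
    if ai_count ≥ 2 then "AI/머신러닝"
    else
      let system_count : Int :=
        (keywords.map (fun k => if k ∈ ["GPU", "NPU", "하드웨어", "모니터링", "프로토콜"] then (1 : Int) else 0)).sum
      if system_count ≥ 2 then "시스템/인프라"
      else
        let dev_count : Int :=
          (keywords.map (fun k => if k ∈ ["AI코딩", "AI도구", "웹개발", "API"] then (1 : Int) else 0)).sum
        if dev_count ≥ 2 then "개발도구"
        else category

-- ===== PORT B =====
def pvLookup : PySem.Dict String String :=
  PySem.Dict.ofList
    [("AI", "AI/머신러닝"), ("LLM", "AI/머신러닝"), ("GPT", "AI/머신러닝"),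
     ("Claude", "AI/머신러닝"), ("에이전트", "AI/머신러닝"), ("머신러닝", "AI/머신러닝"),
     ("GPU", "시스템/인프라"), ("NPU", "시스템/인프라"), ("하드웨어", "시스템/인프라"),
     ("모니터링", "시스템/인프라"), ("프로토콜", "시스템/인프라"),
     ("AI코딩", "개발도구"), ("AI도구", "개발도구"), ("웹개발", "개발도구"), ("API", "개발도구")]

def determine_primary_topic_alt (category : String) (keywords : List String) : String :=
  if keywords = [] then category
  else
    let counts : PySem.Dict String Int :=
      keywords.foldl (fun d k =>
        match pvLookup.get? k with
        | some label => d.insert label (d.getD label 0 + 1)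
        | none => d) PySem.Dict.empty
    if counts.getD "AI/머신러닝" 0 ≥ 2 then "AI/머신러닝"
    else if counts.getD "시스템/인프라" 0 ≥ 2 then "시스템/인프라"
    else if counts.getD "개발도구" 0 ≥ 2 then "개발도구"
    else category

-- ===== PRECONDITION & SPEC =====
def Spec_determine_primary_topic (category : String) (keywords : List String) (out : String) : Prop := out = determine_primary_topic_alt category keywords
instance (category : String) (keywords : List String) (out : String) : Decidable (Spec_determine_primary_topic category keywords out) := by unfold Spec_determine_primary_topic; infer_instance

-- ===== CLAIM (what is proved, stated in full; the proofs are below) =====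
def Claim_equal_determine_primary_topic : Prop := ∀ (category : String) (keywords : List String), Dom_determine_primary_topic category keywords → Spec_determine_primary_topic category keywords (determine_primary_topic category keywords)

-- ===== LEMMAS AND PROOFS =====

lemma pvLookup_eq_mk : pvLookup = PySem.Dict.mk
    [("AI", "AI/머신러닝"), ("LLM", "AI/머신러닝"), ("GPT", "AI/머신러닝"),
     ("Claude", "AI/머신러닝"), ("에이전트", "AI/머신러닝"), ("머신러닝", "AI/머신러닝"),
     ("GPU", "시스템/인프라"), ("NPU", "시스템/인프라"), ("하드웨어", "시스템/인프라"),
     ("모니터링", "시스템/인프라"), ("프로토콜", "시스템/인프라"),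
     ("AI코딩", "개발도구"), ("AI도구", "개발도구"), ("웹개발", "개발도구"), ("API", "개발도구")] := by
  decide

-- on an assoc list with pairwise-distinct keys, get? finds exactly the listed pairs
lemma pv_get?_mk_some_iff {κ ν : Type} [BEq κ] [LawfulBEq κ] :
    ∀ (l : List (κ × ν)), (l.map (·.1)).Nodup → ∀ (k : κ) (v : ν),
      ((PySem.Dict.mk l).get? k = some v ↔ (k, v) ∈ l) := by
  intro l
  induction l with
  | nil => intro _ k v; simp [PySem.Dict.get?]
  | cons p t ih =>
    intro hnd k v
    obtain ⟨a, b⟩ := p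
    simp only [List.map_cons, List.nodup_cons] at hnd
    rw [PySem.Dict.get?_mk_cons]
    by_cases hak : a = k
    · subst hak
      simp only [BEq.rfl, if_pos]
      constructor
      · intro h
        cases h
        exact List.mem_cons_self
      · intro hm
        rcases List.mem_cons.mp hm with h | h
        · cases h; rfl
        · exact absurd (List.mem_map.mpr ⟨(a, v), h, rfl⟩) hnd.1
    · rw [if_neg (by simpa using hak), ih hnd.2 k v]
      simp only [List.mem_cons]
      constructor
      · intro h; exact Or.inr h
      · rintro (h | h)
        · cases h; exact absurd rfl hak
        · exact h

lemma pv_lookup_ai (k : String) :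
    (pvLookup.get? k = some "AI/머신러닝")
      ↔ k ∈ ["AI", "LLM", "GPT", "Claude", "에이전트", "머신러닝"] := by
  rw [pvLookup_eq_mk, pv_get?_mk_some_iff _ (by decide)]
  simp [Prod.ext_iff]

lemma pv_lookup_sys (k : String) :
    (pvLookup.get? k = some "시스템/인프라")
      ↔ k ∈ ["GPU", "NPU", "하드웨어", "모니터링", "프로토콜"] := by
  rw [pvLookup_eq_mk, pv_get?_mk_some_iff _ (by decide)]
  simp [Prod.ext_iff]

lemma pv_lookup_dev (k : String) :
    (pvLookup.get? k = some "개발도구")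
      ↔ k ∈ ["AI코딩", "AI도구", "웹개발", "API"] := by
  rw [pvLookup_eq_mk, pv_get?_mk_some_iff _ (by decide)]
  simp [Prod.ext_iff]

-- B's conditional counting fold is the plain counting fold over the filterMap through the lookup
lemma pv_fold_filterMap (f : String → Option String) :
    ∀ (xs : List String) (d : PySem.Dict String Int),
      xs.foldl (fun d k =>
        match f k with
        | some label => d.insert label (d.getD label 0 + 1)
        | none => d) d
      = (xs.filterMap f).foldl (fun d x => d.insert x (d.getD x 0 + 1)) d := by
  intro xs
  induction xs with
  | nil => intro d; simp
  | cons k xs ih =>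
    intro d
    cases h : f k <;> simp [h, ih]

lemma pv_getD_count (v : String) :
    ∀ (xs : List String) (d : PySem.Dict String Int),
      (xs.foldl (fun d x => d.insert x (d.getD x 0 + 1)) d).getD v 0
        = d.getD v 0 + (xs.count v : Int) := by
  intro xs
  induction xs with
  | nil => intro d; simp
  | cons x xs ih =>
    intro d
    rw [List.foldl_cons, ih]
    by_cases hx : x = v
    · subst hx
      rw [PySem.Dict.getD_insert_self, List.count_cons_self]
      push_cast; ring
    · rw [PySem.Dict.getD_insert_of_ne d _ _ (Ne.symm hx), List.count_cons_of_ne hx]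

-- B's per-label count equals A's membership-scan sum, given that the lookup hits the label exactly on that list
lemma pv_counts_eq (lst : List String) (label : String)
    (hiff : ∀ k, pvLookup.get? k = some label ↔ k ∈ lst) (keywords : List String) :
    ((keywords.foldl (fun d k =>
        match pvLookup.get? k with
        | some l => d.insert l (d.getD l 0 + 1)
        | none => d) (PySem.Dict.empty : PySem.Dict String Int)).getD label 0)
      = (keywords.map (fun k => if k ∈ lst then (1 : Int) else 0)).sum := by
  rw [pv_fold_filterMap, pv_getD_count]
  rw [show (PySem.Dict.empty : PySem.Dict String Int).getD label 0 = 0 from rfl, zero_add]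
  rw [show (fun k => if k ∈ lst then (1 : Int) else 0)
        = (fun k => if (decide (k ∈ lst)) = true then (1 : Int) else 0) by
      funext k; by_cases h : k ∈ lst <;> simp [h]]
  rw [PySem.List.sum_map_ite_one_zero]
  congr 1
  rw [List.count, List.countP_filterMap]
  apply List.countP_congr
  intro k _
  cases h : pvLookup.get? k <;> simp_all [(hiff k).symm]

-- ===== VERDICT (by name: the statement is the Claim_ definition above) =====
theorem determine_primary_topic_spec : Claim_equal_determine_primary_topic := by
  intro category keywords _
  unfold Spec_determine_primary_topic determine_primary_topic determine_primary_topic_alt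
  by_cases hnil : keywords = []
  · simp [hnil]
  · simp only [hnil, if_false]
    rw [pv_counts_eq _ _ pv_lookup_ai, pv_counts_eq _ _ pv_lookup_sys,
        pv_counts_eq _ _ pv_lookup_dev]
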